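-- pv_equiv track=rewrite | github.com/seokcode/Python_Codingtest | By-Python/programmers/[2018-KAKAO-BLIND-RECRUITMENT]/프렌즈4블록.py | pang
-- ===== SOURCE A (Python) =====
-- def pang(b, m, n):
--     candidate = set()
--     # 2X2인 블록 찾기
--     # candidate에 중복되는 블록이 들어가지 않게 set.union을 이용한 합집합 연산
--     for i in range(1, n):
--         for j in range(1, m):
--             if b[i][j] == b[i-1][j-1] == b[i-1][j] == b[i][j-1] != '_':
--                 candidate = set.union(candidate,([(i, j), (i-1, j-1), (i-1, j), (i, j-1)]))
--
--     # 블럭 내리기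
--     for i, j in candidate:
--         b[i][j] = 0
--     for i, row in enumerate(b):
--         empty = ['_'] * row.count(0)
--         b[i] = empty + [block for block in row if block != 0]
--     return len(candidate)
-- ===== SOURCE B (Python) =====
-- def pang(b, m, n):
--     # Inverted viewpoint: instead of scanning windows and accumulating a set/mask of
--     # cleared coordinates, test each CELL directly - it is cleared iff one of the (at
--     # most four) 2x2 windows containing it is uniform and not '_'. The count and the
--     # kept rows are then plain comprehensions over the cells; no cleared-collection
--     # data structure exists at any point.
--     def window(a, c):
--         v = b[a][c]
--         return v != '_' and v == b[a-1][c-1] == b[a-1][c] == b[a][c-1]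
--
--     def cleared(i, j):
--         return any(window(a, c)
--                    for a in (i, i + 1) if 1 <= a < n
--                    for c in (j, j + 1) if 1 <= c < m)
--
--     total = sum(1 for i, row in enumerate(b)
--                 for j in range(len(row)) if cleared(i, j))
--     kept_rows = [[row[j] for j in range(len(row)) if not cleared(i, j)]
--                  for i, row in enumerate(b)]
--     for i, kept in enumerate(kept_rows):
--         b[i] = ['_'] * (len(b[i]) - len(kept)) + kept
--     return total
-- ===== Notes on version B (the rewrite author's own statement) =====
-- stated objective: alternative
-- what changed: B inverts the viewpoint: A scans the 2x2 windows and accumulates a set of cleared coordinates that it then zeroes, counts and filters out in three extra board passes; B accumulates nothing - it decides per CELL whether any of the at most four windows containing it is uniform, and the count and kept rows are direct comprehensions over that per-cell predicate.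
-- outside the precondition, e.g. on pang([['A'], ['B', 'C']], 2, 2): A returns 0, B returns 0
import Mathlib
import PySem

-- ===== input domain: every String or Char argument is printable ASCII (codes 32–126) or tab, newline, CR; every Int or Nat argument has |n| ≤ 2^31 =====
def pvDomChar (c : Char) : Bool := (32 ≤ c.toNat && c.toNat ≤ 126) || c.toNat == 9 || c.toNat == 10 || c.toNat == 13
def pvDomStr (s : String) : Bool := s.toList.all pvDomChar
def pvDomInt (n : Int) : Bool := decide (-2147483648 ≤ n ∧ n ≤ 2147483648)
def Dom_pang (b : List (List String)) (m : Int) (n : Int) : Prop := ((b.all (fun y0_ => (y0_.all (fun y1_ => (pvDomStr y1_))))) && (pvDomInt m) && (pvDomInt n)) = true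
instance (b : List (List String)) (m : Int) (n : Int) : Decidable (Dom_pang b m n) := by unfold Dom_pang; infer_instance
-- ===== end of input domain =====

-- B replaces A's window scan + accumulated coordinate set + three extra board passes by a
-- per-cell predicate (a cell is cleared iff one of the ≤4 windows containing it matches)
-- and direct comprehensions over the cells (objective: alternative). Both A and B mutate
-- `b` in place in Python (same final board); the equivalence proved here is about the
-- RETURN value.

-- ===== PORT A =====
-- b[i][j] with both indices known nonnegative and in range wherever the program reads
-- (guaranteed by Pre_pang for every index the loops produce); exact there.
def pangGetA (b : List (List String)) (i j : Int) : String :=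
  PySem.List.pyGetD (PySem.List.pyGetD b i []) j ""

def pang (b : List (List String)) (m : Int) (n : Int) : Int :=
  let candidate : PySem.Set (Int × Int) :=
    (PySem.List.pyRange 1 n).foldl (fun c i =>
      (PySem.List.pyRange 1 m).foldl (fun c j =>
        if pangGetA b i j = pangGetA b (i-1) (j-1) ∧
           pangGetA b (i-1) (j-1) = pangGetA b (i-1) j ∧
           pangGetA b (i-1) j = pangGetA b i (j-1) ∧
           pangGetA b i (j-1) ≠ "_"
        then PySem.Set.update c [(i, j), (i-1, j-1), (i-1, j), (i, j-1)]
        else c) c) PySem.Set.empty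
  -- in-place block dropping (0 = the int sentinel, modelled as `none`); the result is
  -- discarded because the Python returns len(candidate), not the board (the set's
  -- iteration order is consumed only by order-independent in-place writes)
  let b0 : List (List (Option String)) := b.map (fun row => row.map some)
  let b1 := candidate.foldl (fun bb p =>
    bb.set p.1.toNat ((bb.getD p.1.toNat []).set p.2.toNat none)) b0
  let _b2 := b1.map (fun row =>
    List.replicate (row.count none) (some "_") ++ row.filter (fun x => x != none))
  PySem.Set.len candidate

-- ===== PORT B =====
def pangGetB (b : List (List String)) (i j : Int) : String :=
  PySem.List.pyGetD (PySem.List.pyGetD b i []) j ""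

-- window(a, c): the 2x2 block with bottom-right corner (a, c) is uniform and not '_'
def pangWinB (b : List (List String)) (a c : Int) : Bool :=
  decide (pangGetB b a c ≠ "_" ∧ pangGetB b a c = pangGetB b (a-1) (c-1) ∧
          pangGetB b (a-1) (c-1) = pangGetB b (a-1) c ∧
          pangGetB b (a-1) c = pangGetB b a (c-1))

-- cleared(i, j): some window containing cell (i, j) matches
def pangClr (b : List (List String)) (m n : Int) (i j : Int) : Bool :=
  [i, i + 1].any (fun a => decide (1 ≤ a ∧ a < n) &&
    [j, j + 1].any (fun c => decide (1 ≤ c ∧ c < m) && pangWinB b a c))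

def pang_alt (b : List (List String)) (m : Int) (n : Int) : Int :=
  let total : Int := ((PySem.List.enumerate b).map (fun p =>
      ((List.range p.2.length).countP (fun (j : Nat) => pangClr b m n p.1 (j : Int)) : Int))).sum
  let keptRows : List (List String) := (PySem.List.enumerate b).map (fun p =>
      ((List.range p.2.length).filter (fun (j : Nat) => !pangClr b m n p.1 (j : Int))).map
        (fun (j : Nat) => p.2.getD j ""))
  -- in-place rebuild of each row (result discarded: the Python returns total)
  let _b2 := (PySem.List.enumerate keptRows).foldl (fun (bb : List (List String)) p =>
      PySem.List.pySetD bb p.1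
        (List.replicate ((PySem.List.pyGetD bb p.1 []).length - p.2.length) "_" ++ p.2)) b
  total

-- ===== PRECONDITION & SPEC =====
-- Pre_pang excludes boards whose first n rows are too short (or that have fewer than n
-- rows) for the m×n scan: there a 2×2 read can run off the board and A raises IndexError;
-- on a few such ragged boards A happens to return anyway only because Python's chained
-- comparison short-circuits before the out-of-range read — a data-dependent accident that
-- no closed-form precondition can keep (B agrees with A wherever that happens).
def Pre_pang (b : List (List String)) (m : Int) (n : Int) : Prop :=
  (2 ≤ n ∧ 2 ≤ m) → (n ≤ b.length ∧ ∀ row ∈ b.take n.toNat, m ≤ (row.length : Int))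
instance (b : List (List String)) (m : Int) (n : Int) : Decidable (Pre_pang b m n) := by
  unfold Pre_pang; infer_instance

def pvWitness_pang : List (List String) × Int × Int :=
  ([["A", "A", "B"], ["A", "A", "B"]], 3, 2)

def Spec_pang (b : List (List String)) (m : Int) (n : Int) (out : Int) : Prop := out = pang_alt b m n
instance (b : List (List String)) (m : Int) (n : Int) (out : Int) : Decidable (Spec_pang b m n out) := by unfold Spec_pang; infer_instance

-- ===== CLAIM (what is proved, stated in full; the proofs are below) =====
def Claim_equal_pang : Prop := ∀ (b : List (List String)) (m : Int) (n : Int), Dom_pang b m n → Pre_pang b m n → Spec_pang b m n (pang b m n)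

-- ===== LEMMAS AND PROOFS =====

-- A's window condition as a named proposition, and the four cells of the window at (i, j)
def pangCondA (b : List (List String)) (i j : Int) : Prop :=
  pangGetA b i j = pangGetA b (i-1) (j-1) ∧
  pangGetA b (i-1) (j-1) = pangGetA b (i-1) j ∧
  pangGetA b (i-1) j = pangGetA b i (j-1) ∧
  pangGetA b i (j-1) ≠ "_"

def pangCells (i j : Int) : List (Int × Int) := [(i, j), (i-1, j-1), (i-1, j), (i, j-1)]

-- the per-cell clearing predicate both programs compute
def pangPred (b : List (List String)) (m n : Int) (q : Int × Int) : Prop :=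
  ∃ i, (1 ≤ i ∧ i < n) ∧ ∃ j, (1 ≤ j ∧ j < m) ∧ pangCondA b i j ∧ q ∈ pangCells i j

-- the common count: number of board cells satisfying the predicate
def pangCount (b : List (List String)) (m n : Int) : Nat :=
  ((List.range b.length).map (fun r =>
    (List.range (b.getD r []).length).countP (fun (s : Nat) => pangClr b m n (r:Int) (s:Int)))).sum

theorem pang_nodup_add {α : Type} [BEq α] [LawfulBEq α] (s : PySem.Set α) (x : α)
    (h : s.Nodup) : (PySem.Set.add s x).Nodup := by
  by_cases hx : x ∈ s
  · rw [PySem.Set.add_of_mem hx]; exact h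
  · rw [PySem.Set.add_of_not_mem hx]
    rw [List.nodup_append]
    exact ⟨h, List.nodup_singleton x, by
      intro a ha c hc
      simp only [List.mem_singleton] at hc
      subst hc
      exact fun h' => hx (h' ▸ ha)⟩

theorem pang_nodup_update {α : Type} [BEq α] [LawfulBEq α] (l : List α) (s : PySem.Set α)
    (h : s.Nodup) : (PySem.Set.update s l).Nodup := by
  induction l generalizing s with
  | nil => simpa [PySem.Set.update_nil] using h
  | cons x xs ih => rw [PySem.Set.update_cons]; exact ih _ (pang_nodup_add s x h)

theorem pang_mem_update {α : Type} [BEq α] [LawfulBEq α] (l : List α) (s : PySem.Set α)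
    (q : α) : q ∈ PySem.Set.update s l ↔ q ∈ s ∨ q ∈ l := by
  induction l generalizing s with
  | nil => simp [PySem.Set.update_nil]
  | cons x xs ih =>
    rw [PySem.Set.update_cons, ih, PySem.Set.mem_add]
    simp only [List.mem_cons]
    tauto

theorem pang_foldJ (b : List (List String)) (i : Int) (js : List Int)
    (c : PySem.Set (Int × Int)) (h : c.Nodup) :
    (js.foldl (fun c j =>
        if pangGetA b i j = pangGetA b (i-1) (j-1) ∧
           pangGetA b (i-1) (j-1) = pangGetA b (i-1) j ∧
           pangGetA b (i-1) j = pangGetA b i (j-1) ∧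
           pangGetA b i (j-1) ≠ "_"
        then PySem.Set.update c [(i, j), (i-1, j-1), (i-1, j), (i, j-1)]
        else c) c).Nodup ∧
    ∀ q, (q ∈ js.foldl (fun c j =>
        if pangGetA b i j = pangGetA b (i-1) (j-1) ∧
           pangGetA b (i-1) (j-1) = pangGetA b (i-1) j ∧
           pangGetA b (i-1) j = pangGetA b i (j-1) ∧
           pangGetA b i (j-1) ≠ "_"
        then PySem.Set.update c [(i, j), (i-1, j-1), (i-1, j), (i, j-1)]
        else c) c ↔ q ∈ c ∨ ∃ j ∈ js, pangCondA b i j ∧ q ∈ pangCells i j) := by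
  induction js generalizing c with
  | nil => exact ⟨h, fun q => by simp⟩
  | cons j js ih =>
    simp only [List.foldl_cons]
    by_cases hc : pangGetA b i j = pangGetA b (i-1) (j-1) ∧
        pangGetA b (i-1) (j-1) = pangGetA b (i-1) j ∧
        pangGetA b (i-1) j = pangGetA b i (j-1) ∧
        pangGetA b i (j-1) ≠ "_"
    · rw [if_pos hc]
      obtain ⟨hn, hm⟩ := ih (PySem.Set.update c [(i, j), (i-1, j-1), (i-1, j), (i, j-1)])
        (pang_nodup_update _ _ h)
      refine ⟨hn, fun q => ?_⟩
      rw [hm q, pang_mem_update]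
      constructor
      · rintro ((hq | hq) | ⟨j', hj', hcj, hcell⟩)
        · exact Or.inl hq
        · exact Or.inr ⟨j, List.mem_cons_self, hc, hq⟩
        · exact Or.inr ⟨j', List.mem_cons_of_mem _ hj', hcj, hcell⟩
      · rintro (hq | ⟨j', hj', hcj, hcell⟩)
        · exact Or.inl (Or.inl hq)
        · rcases List.mem_cons.mp hj' with rfl | hj'
          · exact Or.inl (Or.inr hcell)
          · exact Or.inr ⟨j', hj', hcj, hcell⟩
    · rw [if_neg hc]
      obtain ⟨hn, hm⟩ := ih c h
      refine ⟨hn, fun q => ?_⟩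
      rw [hm q]
      constructor
      · rintro (hq | ⟨j', hj', hcj, hcell⟩)
        · exact Or.inl hq
        · exact Or.inr ⟨j', List.mem_cons_of_mem _ hj', hcj, hcell⟩
      · rintro (hq | ⟨j', hj', hcj, hcell⟩)
        · exact Or.inl hq
        · rcases List.mem_cons.mp hj' with rfl | hj'
          · exact absurd hcj hc
          · exact Or.inr ⟨j', hj', hcj, hcell⟩

theorem pang_foldI (b : List (List String)) (m : Int) (is : List Int)
    (c : PySem.Set (Int × Int)) (h : c.Nodup) :
    (is.foldl (fun c i =>
        (PySem.List.pyRange 1 m).foldl (fun c j =>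
          if pangGetA b i j = pangGetA b (i-1) (j-1) ∧
             pangGetA b (i-1) (j-1) = pangGetA b (i-1) j ∧
             pangGetA b (i-1) j = pangGetA b i (j-1) ∧
             pangGetA b i (j-1) ≠ "_"
          then PySem.Set.update c [(i, j), (i-1, j-1), (i-1, j), (i, j-1)]
          else c) c) c).Nodup ∧
    ∀ q, (q ∈ is.foldl (fun c i =>
        (PySem.List.pyRange 1 m).foldl (fun c j =>
          if pangGetA b i j = pangGetA b (i-1) (j-1) ∧
             pangGetA b (i-1) (j-1) = pangGetA b (i-1) j ∧
             pangGetA b (i-1) j = pangGetA b i (j-1) ∧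
             pangGetA b i (j-1) ≠ "_"
          then PySem.Set.update c [(i, j), (i-1, j-1), (i-1, j), (i, j-1)]
          else c) c) c ↔
      q ∈ c ∨ ∃ i ∈ is, ∃ j ∈ PySem.List.pyRange 1 m, pangCondA b i j ∧ q ∈ pangCells i j) := by
  induction is generalizing c with
  | nil => exact ⟨h, fun q => by simp⟩
  | cons i is ih =>
    simp only [List.foldl_cons]
    obtain ⟨hn1, hm1⟩ := pang_foldJ b i (PySem.List.pyRange 1 m) c h
    obtain ⟨hn, hm⟩ := ih _ hn1
    refine ⟨hn, fun q => ?_⟩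
    rw [hm q, hm1 q]
    constructor
    · rintro ((hq | ⟨j, hj, hcj, hcell⟩) | ⟨i', hi', j, hj, hcj, hcell⟩)
      · exact Or.inl hq
      · exact Or.inr ⟨i, List.mem_cons_self, j, hj, hcj, hcell⟩
      · exact Or.inr ⟨i', List.mem_cons_of_mem _ hi', j, hj, hcj, hcell⟩
    · rintro (hq | ⟨i', hi', j, hj, hcj, hcell⟩)
      · exact Or.inl (Or.inl hq)
      · rcases List.mem_cons.mp hi' with rfl | hi'
        · exact Or.inl (Or.inr ⟨j, hj, hcj, hcell⟩)
        · exact Or.inr ⟨i', hi', j, hj, hcj, hcell⟩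

-- A's condition and B's window test are the same up to the placement of the '_' check
theorem pang_cond_iff (b : List (List String)) (a c : Int) :
    (pangGetB b a c ≠ "_" ∧ pangGetB b a c = pangGetB b (a-1) (c-1) ∧
      pangGetB b (a-1) (c-1) = pangGetB b (a-1) c ∧
      pangGetB b (a-1) c = pangGetB b a (c-1)) ↔ pangCondA b a c := by
  unfold pangCondA pangGetA pangGetB
  constructor <;> rintro ⟨h1, h2, h3, h4⟩ <;> simp_all

-- B's per-cell test decides exactly the predicate
theorem pang_clr_iff (b : List (List String)) (m n : Int) (i j : Int) :
    pangClr b m n i j = true ↔ pangPred b m n (i, j) := by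
  unfold pangClr pangWinB pangPred pangCells
  simp only [List.any_cons, List.any_nil, Bool.or_false, Bool.or_eq_true, Bool.and_eq_true,
    decide_eq_true_eq, pang_cond_iff, List.mem_cons, List.not_mem_nil, or_false,
    Prod.mk.injEq]
  constructor
  · rintro ((⟨hi, ⟨hj, hw⟩ | ⟨hj, hw⟩⟩) | (⟨hi, ⟨hj, hw⟩ | ⟨hj, hw⟩⟩))
    · exact ⟨i, hi, j, hj, hw, Or.inl ⟨rfl, rfl⟩⟩
    · exact ⟨i, hi, j + 1, hj, hw, Or.inr (Or.inr (Or.inr ⟨rfl, by omega⟩))⟩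
    · exact ⟨i + 1, hi, j, hj, hw, Or.inr (Or.inr (Or.inl ⟨by omega, rfl⟩))⟩
    · exact ⟨i + 1, hi, j + 1, hj, hw, Or.inr (Or.inl ⟨by omega, by omega⟩)⟩
  · rintro ⟨a, ha, c, hc, hw, ⟨h5, h6⟩ | ⟨h5, h6⟩ | ⟨h5, h6⟩ | ⟨h5, h6⟩⟩
    · obtain rfl : a = i := h5.symm
      obtain rfl : c = j := h6.symm
      exact Or.inl ⟨ha, Or.inl ⟨hc, hw⟩⟩
    · obtain rfl : a = i + 1 := by omega
      obtain rfl : c = j + 1 := by omega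
      exact Or.inr ⟨ha, Or.inr ⟨hc, hw⟩⟩
    · obtain rfl : a = i + 1 := by omega
      obtain rfl : c = j := by omega
      exact Or.inr ⟨ha, Or.inl ⟨hc, hw⟩⟩
    · obtain rfl : a = i := by omega
      obtain rfl : c = j + 1 := by omega
      exact Or.inl ⟨ha, Or.inr ⟨hc, hw⟩⟩

-- inside Pre_, a cleared cell lies on the board
theorem pang_pred_bounds (b : List (List String)) (m n : Int) (hpre : Pre_pang b m n)
    (q : Int × Int) (h : pangPred b m n q) :
    0 ≤ q.1 ∧ q.1 < (b.length : Int) ∧ 0 ≤ q.2 ∧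
      q.2 < ((b.getD q.1.toNat []).length : Int) := by
  obtain ⟨i, ⟨hi1, hi2⟩, j, ⟨hj1, hj2⟩, hcond, hcell⟩ := h
  obtain ⟨hn, hrows⟩ := hpre ⟨by omega, by omega⟩
  unfold pangCells at hcell
  simp only [List.mem_cons, List.not_mem_nil, or_false, Prod.ext_iff] at hcell
  have hq1 : q.1 = i ∨ q.1 = i - 1 := by
    rcases hcell with ⟨h1, -⟩ | ⟨h1, -⟩ | ⟨h1, -⟩ | ⟨h1, -⟩ <;> omega
  have hq2 : q.2 = j ∨ q.2 = j - 1 := by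
    rcases hcell with ⟨-, h2⟩ | ⟨-, h2⟩ | ⟨-, h2⟩ | ⟨-, h2⟩ <;> omega
  have hklt : q.1.toNat < b.length := by omega
  have hrow : m ≤ ((b.getD q.1.toNat []).length : Int) := by
    apply hrows
    rw [List.getD_eq_getElem _ _ hklt]
    have htake : q.1.toNat < (b.take n.toNat).length := by
      simp only [List.length_take]; omega
    have hel : b[q.1.toNat]'hklt = (b.take n.toNat)[q.1.toNat]'htake := by
      rw [List.getElem_take]
    rw [hel]
    exact List.getElem_mem _
  exact ⟨by omega, by omega, by omega, by omega⟩

def pangGrid (b : List (List String)) : List (Int × Int) :=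
  (List.range b.length).flatMap (fun r =>
    (List.range (b.getD r []).length).map (fun s : Nat => ((r:Int), (s:Int))))

theorem pang_mem_grid (b : List (List String)) (q : Int × Int) :
    q ∈ pangGrid b ↔ ∃ r < b.length, ∃ s < (b.getD r []).length, q = ((r:Int), (s:Int)) := by
  simp [pangGrid, List.mem_flatMap, List.mem_range, List.mem_map, eq_comm]

theorem pang_nodup_grid (b : List (List String)) : (pangGrid b).Nodup := by
  unfold pangGrid
  rw [List.nodup_flatMap]
  refine ⟨fun r _ => ?_, ?_⟩
  · have hinj : Function.Injective (fun s : Nat => ((r : Int), (s : Int))) := by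
      intro a a' haa'
      have h2 := congrArg Prod.snd haa'
      simpa using h2
    exact List.Nodup.map hinj List.nodup_range
  · refine List.Pairwise.imp ?_ List.pairwise_lt_range
    intro r1 r2 hlt p hp1 hp2
    simp only [List.mem_map] at hp1 hp2
    obtain ⟨s1, -, hs1⟩ := hp1
    obtain ⟨s2, -, hs2⟩ := hp2
    have h12 : ((r2 : Int), (s2 : Int)) = ((r1 : Int), (s1 : Int)) := hs2.trans hs1.symm
    have : (r2 : Int) = (r1 : Int) := congrArg Prod.fst h12
    omega

theorem pang_grid_filter_length (b : List (List String)) (m n : Int) :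
    ((pangGrid b).filter (fun q => pangClr b m n q.1 q.2)).length = pangCount b m n := by
  unfold pangGrid pangCount
  rw [List.filter_flatMap, List.length_flatMap]
  congr 1
  apply List.map_congr_left
  intro r _
  rw [List.filter_map, List.length_map, List.countP_eq_length_filter]
  congr 1

-- A's result: the candidate set holds exactly the cleared cells, once each
theorem pang_A_count (b : List (List String)) (m n : Int) (hpre : Pre_pang b m n) :
    pang b m n = (pangCount b m n : Int) := by
  obtain ⟨hnd, hmem⟩ := pang_foldI b m (PySem.List.pyRange 1 n) PySem.Set.empty
    (by simp [PySem.Set.empty])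
  simp only [pang]
  have hmem' : ∀ q, q ∈ (PySem.List.pyRange 1 n).foldl (fun c i =>
      (PySem.List.pyRange 1 m).foldl (fun c j =>
        if pangGetA b i j = pangGetA b (i-1) (j-1) ∧
           pangGetA b (i-1) (j-1) = pangGetA b (i-1) j ∧
           pangGetA b (i-1) j = pangGetA b i (j-1) ∧
           pangGetA b i (j-1) ≠ "_"
        then PySem.Set.update c [(i, j), (i-1, j-1), (i-1, j), (i, j-1)]
        else c) c) PySem.Set.empty ↔ pangPred b m n q := by
    intro q
    rw [hmem q]
    simp only [PySem.Set.empty, List.not_mem_nil, false_or, PySem.List.mem_pyRange_one]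
    unfold pangPred
    constructor
    · rintro ⟨i, hi, j, hj, hc, hcell⟩
      exact ⟨i, hi, j, hj, hc, hcell⟩
    · rintro ⟨i, hi, j, hj, hc, hcell⟩
      exact ⟨i, hi, j, hj, hc, hcell⟩
  have hperm : ((PySem.List.pyRange 1 n).foldl (fun c i =>
      (PySem.List.pyRange 1 m).foldl (fun c j =>
        if pangGetA b i j = pangGetA b (i-1) (j-1) ∧
           pangGetA b (i-1) (j-1) = pangGetA b (i-1) j ∧
           pangGetA b (i-1) j = pangGetA b i (j-1) ∧
           pangGetA b i (j-1) ≠ "_"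
        then PySem.Set.update c [(i, j), (i-1, j-1), (i-1, j), (i, j-1)]
        else c) c) PySem.Set.empty).Perm
      ((pangGrid b).filter (fun q => pangClr b m n q.1 q.2)) := by
    rw [List.perm_ext_iff_of_nodup hnd (List.Nodup.filter _ (pang_nodup_grid b))]
    intro q
    rw [List.mem_filter, hmem' q]
    constructor
    · intro hq
      have hb := pang_pred_bounds b m n hpre q hq
      refine ⟨?_, ?_⟩
      · rw [pang_mem_grid]
        refine ⟨q.1.toNat, by omega, q.2.toNat, by omega, ?_⟩
        ext
        · simp; omega
        · simp; omega
      · rw [pang_clr_iff]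
        simpa using hq
    · rintro ⟨-, hclr⟩
      rw [pang_clr_iff] at hclr
      simpa using hclr
  rw [show ∀ s : PySem.Set (Int × Int), PySem.Set.len s = (s.length : Int) from fun s => rfl]
  rw [hperm.length_eq, pang_grid_filter_length]

-- B's result: the comprehension sums the same per-cell counts
theorem pang_alt_sum (b : List (List String)) (m n : Int) (rows : List (List String))
    (k : Nat) :
    ((PySem.List.enumerate rows (k:Int)).map (fun p =>
        ((List.range p.2.length).countP (fun (j : Nat) => pangClr b m n p.1 (j : Int)) : Int))).sum
    = ((List.range rows.length).map (fun t =>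
        ((List.range (rows.getD t []).length).countP
          (fun (s : Nat) => pangClr b m n ((k + t : Nat) : Int) (s:Int)) : Int))).sum := by
  induction rows generalizing k with
  | nil => simp [PySem.List.enumerate]
  | cons r rs ih =>
    have hcons : PySem.List.enumerate (r :: rs) (k : Int)
        = ((k : Int), r) :: PySem.List.enumerate rs ((k : Int) + 1) := by
      simp [PySem.List.enumerate]
    rw [hcons]
    simp only [List.map_cons, List.sum_cons]
    have hcast : ((k : Int) + 1) = ((k + 1 : Nat) : Int) := by push_cast; ring
    rw [hcast, ih (k + 1)]
    simp only [List.length_cons, List.range_succ_eq_map, List.map_cons, List.sum_cons,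
      List.map_map, Function.comp_def, List.getD_cons_zero, List.getD_cons_succ,
      Nat.add_zero]
    congr 1
    congr 1
    apply List.map_congr_left
    intro t _
    rw [show k + 1 + t = k + t.succ by omega]

theorem pang_B_count (b : List (List String)) (m n : Int) :
    pang_alt b m n = (pangCount b m n : Int) := by
  simp only [pang_alt]
  have h0 := pang_alt_sum b m n b 0
  simp only [Nat.cast_zero, Nat.zero_add] at h0
  rw [h0]
  unfold pangCount
  rw [Nat.cast_list_sum, List.map_map]
  rfl

-- ===== VERDICT (by name: the statement is the Claim_ definition above) =====
theorem pang_spec : Claim_equal_pang := by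
  intro b m n _ hpre
  show pang b m n = pang_alt b m n
  rw [pang_A_count b m n hpre, pang_B_count b m n]
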